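-- pv_equiv track=rewrite | github.com/spwpun/leetcode | fractions_assect.py | solution
-- ===== SOURCE A (Python) =====
-- def solution(X, Y):
--     # write your code in Python (Python 3.6)
--     # 求最大公因子
--     def gcd(a, b):
--         if b == 0:
--             return a
--         return gcd(b, a % b)
--     assert len(X) == len(Y)
--     cnt = 0
--     for i in range(len(X)):
--         max_factor = gcd(X[i], Y[i])
--         X[i] = X[i] // max_factor
--         Y[i] = Y[i] // max_factor
--     for i in range(len(X)):
--         for j in range(i + 1, len(X)):
--             if Y[i] == Y[j] and X[i] + X[j] == Y[i]:
--                 cnt += 1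
--
--     return cnt
-- ===== SOURCE B (Python) =====
-- def solution(X, Y):
--     # One pass: hash-count reduced fractions seen so far and add the count of
--     # the complement (y - x, y) at each step (O(n) pairs counting vs A's O(n^2)).
--     assert len(X) == len(Y)
--     seen = {}
--     cnt = 0
--     for x, y in zip(X, Y):
--         a, b = x, y
--         while b:
--             a, b = b, a % b
--         x //= a
--         y //= a
--         cnt += seen.get((y - x, y), 0)
--         seen[(x, y)] = seen.get((x, y), 0) + 1
--     return cnt
-- ===== Notes on version B (the rewrite author's own statement) =====
-- stated objective: faster
-- what changed: Replaces A's O(n^2) all-pairs double loop with a single pass that counts reduced fractions in a hash map and adds the count of the complement (y-x, y) at each step.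
import Mathlib
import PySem

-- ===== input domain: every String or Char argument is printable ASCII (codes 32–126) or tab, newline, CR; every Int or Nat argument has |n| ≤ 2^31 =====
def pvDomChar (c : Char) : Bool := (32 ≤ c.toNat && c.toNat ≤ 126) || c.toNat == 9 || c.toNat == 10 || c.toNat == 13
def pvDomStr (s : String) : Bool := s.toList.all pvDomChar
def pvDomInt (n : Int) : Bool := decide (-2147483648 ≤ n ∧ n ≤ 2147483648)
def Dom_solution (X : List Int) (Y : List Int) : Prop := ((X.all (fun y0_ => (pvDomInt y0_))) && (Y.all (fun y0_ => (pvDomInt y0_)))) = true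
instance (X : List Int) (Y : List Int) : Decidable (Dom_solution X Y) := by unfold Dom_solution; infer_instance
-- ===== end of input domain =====

-- B replaces A's quadratic all-pairs scan by one pass that hash-counts reduced
-- fractions and looks up the complement (y-x, y); objective: faster (asymptotic).
-- A mutates its arguments in place (reduces each fraction); B does not — the
-- equivalence proved here is about the RETURN value only.

-- ===== PORT A =====
-- A's recursive helper gcd(a, b) with Python's % (sign of the divisor)
def pygcdA (a b : Int) : Int :=
  if h : b = 0 then a else pygcdA b (PySem.Int.mod a b)
termination_by b.natAbs
decreasing_by
  rcases lt_or_gt_of_ne h with hb | hb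
  · have h1 := PySem.Int.mod_neg_bounds a hb
    omega
  · have h1 := PySem.Int.mod_nonneg a hb
    have h2 := PySem.Int.mod_lt a hb
    omega

def solution (X : List Int) (Y : List Int) : Int :=
  -- first loop: X[i], Y[i] = X[i] // g, Y[i] // g elementwise
  let R := (X.zip Y).map (fun p =>
    let g := pygcdA p.1 p.2
    (PySem.Int.floordiv p.1 g, PySem.Int.floordiv p.2 g))
  -- second loop: for i in range(n): for j in range(i+1, n): if …: cnt += 1
  (PySem.List.pyRange 0 R.length 1).foldl (fun cnt i =>
    (PySem.List.pyRange (i + 1) R.length 1).foldl (fun cnt j =>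
      if (PySem.List.pyGetD R i (0, 0)).2 = (PySem.List.pyGetD R j (0, 0)).2 ∧
         (PySem.List.pyGetD R i (0, 0)).1 + (PySem.List.pyGetD R j (0, 0)).1
           = (PySem.List.pyGetD R i (0, 0)).2
      then cnt + 1 else cnt) cnt) 0

-- ===== PORT B =====
-- B's while loop 'while b: a, b = b, a % b', run with enough fuel (|b| steps suffice:
-- |a % b| < |b| strictly decreases; with b = 0 the loop body never runs)
def pygcdBgo : Nat → Int → Int → Int
  | 0, a, _ => a
  | fuel + 1, a, b => if b = 0 then a else pygcdBgo fuel b (PySem.Int.mod a b)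

def pygcdB (a b : Int) : Int := pygcdBgo b.natAbs a b

def solution_alt (X : List Int) (Y : List Int) : Int :=
  -- one pass over zip(X, Y): reduce, add count of complement seen so far, record pair
  ((X.zip Y).foldl (fun (st : Int × PySem.Dict (Int × Int) Int) p =>
      let g := pygcdB p.1 p.2
      let x := PySem.Int.floordiv p.1 g
      let y := PySem.Int.floordiv p.2 g
      (st.1 + st.2.getD (y - x, y) 0, st.2.insert (x, y) (st.2.getD (x, y) 0 + 1)))
    (0, PySem.Dict.empty)).1

-- ===== PRECONDITION & SPEC =====
-- Pre_ excludes inputs where Python A raises: unequal lengths (AssertionError) and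
-- a pair X[i] = Y[i] = 0 (gcd is 0, ZeroDivisionError). B raises there too.
def Pre_solution (X : List Int) (Y : List Int) : Prop :=
  X.length = Y.length ∧ ∀ p ∈ X.zip Y, ¬(p.1 = 0 ∧ p.2 = 0)
instance (X : List Int) (Y : List Int) : Decidable (Pre_solution X Y) := by
  unfold Pre_solution; infer_instance

def pvWitness_solution : List Int × List Int := ([1, 2, 1], [2, 4, 2])

def Spec_solution (X : List Int) (Y : List Int) (out : Int) : Prop := out = solution_alt X Y
instance (X : List Int) (Y : List Int) (out : Int) : Decidable (Spec_solution X Y out) := by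
  unfold Spec_solution; infer_instance

-- ===== CLAIM (what is proved, stated in full; the proofs are below) =====
def Claim_equal_solution : Prop := ∀ (X : List Int) (Y : List Int), Dom_solution X Y → Pre_solution X Y → Spec_solution X Y (solution X Y)

-- ===== LEMMAS AND PROOFS =====

-- the complement of a reduced pair: (x, y) matches exactly the earlier pairs (y - x, y)
def pvComp (s : Int × Int) : Int × Int := (s.2 - s.1, s.2)

-- A's count, structurally: head against the rest, then recurse
def pvCntRec : List (Int × Int) → Int
  | [] => 0
  | r :: rs => (rs.countP (fun s => pvComp s == r) : Int) + pvCntRec rs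

-- B's count with an explicit processed prefix
def pvBRec : List (Int × Int) → List (Int × Int) → Int
  | _, [] => 0
  | pre, s :: rest => (pre.count (pvComp s) : Int) + pvBRec (pre ++ [s]) rest

lemma pvBRec_shift (rest : List (Int × Int)) :
    ∀ pre, pvBRec pre rest
      = (rest.map (fun s => (pre.count (pvComp s) : Int))).sum + pvBRec [] rest := by
  induction rest with
  | nil => intro pre; simp [pvBRec]
  | cons s rest ih =>
    intro pre
    rw [pvBRec, ih (pre ++ [s])]
    conv_rhs => rw [pvBRec]
    simp only [List.nil_append]
    rw [ih [s]]
    simp only [List.map_cons, List.sum_cons, List.count_append]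
    push_cast
    rw [PySem.List.sum_map_add_int]
    simp
    ring

lemma pvCntRec_eq_pvBRec (R : List (Int × Int)) : pvCntRec R = pvBRec [] R := by
  induction R with
  | nil => rfl
  | cons r rs ih =>
    rw [pvCntRec, ih]
    conv_rhs => rw [pvBRec]
    simp only [List.nil_append]
    rw [pvBRec_shift rs [r]]
    have hcnt : ∀ s : Int × Int, (List.count (pvComp s) [r] : Int)
        = if (fun s => pvComp s == r) s then (1 : Int) else 0 := by
      intro s; rw [List.count_singleton]; split_ifs <;> simp_all
    simp only [hcnt]
    rw [PySem.List.sum_map_ite_one_zero]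
    simp

lemma pvOuterA (R : List (Int × Int)) :
    ∀ (m : Nat) (k : Int), 0 ≤ k → ((R.length : Int) - k).toNat = m → ∀ c : Int,
    (PySem.List.pyRange k R.length 1).foldl (fun cnt i =>
      (PySem.List.pyRange (i + 1) R.length 1).foldl (fun cnt j =>
        if (PySem.List.pyGetD R i (0, 0)).2 = (PySem.List.pyGetD R j (0, 0)).2 ∧
           (PySem.List.pyGetD R i (0, 0)).1 + (PySem.List.pyGetD R j (0, 0)).1
             = (PySem.List.pyGetD R i (0, 0)).2
        then cnt + 1 else cnt) cnt) c
      = c + pvCntRec (R.drop k.toNat) := by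
  intro m
  induction m with
  | zero =>
    intro k hk h0 c
    rw [PySem.List.pyRange_one_eq_nil (by omega),
        List.drop_eq_nil_of_le (by omega)]
    simp [pvCntRec]
  | succ m ih =>
    intro k hk hm c
    have hklt : k < (R.length : Int) := by omega
    rw [PySem.List.pyRange_one_cons (by omega), List.foldl_cons,
        ih (k + 1) (by omega) (by omega)]
    rw [PySem.List.foldl_pyRange_pyGetD' R (0, 0)
        (fun acc s => if (PySem.List.pyGetD R k (0, 0)).2 = s.2 ∧
            (PySem.List.pyGetD R k (0, 0)).1 + s.1 = (PySem.List.pyGetD R k (0, 0)).2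
          then acc + 1 else acc) c (by omega)]
    rw [PySem.List.foldl_ite_add_one
        (fun s : Int × Int => (PySem.List.pyGetD R k (0, 0)).2 = s.2 ∧
            (PySem.List.pyGetD R k (0, 0)).1 + s.1 = (PySem.List.pyGetD R k (0, 0)).2)]
    rw [PySem.List.pyGetD_eq_getElem R (0, 0) hk hklt]
    have hkn : k.toNat < R.length := by omega
    have hdrop : R.drop k.toNat = R[k.toNat] :: R.drop (k.toNat + 1) :=
      List.drop_eq_getElem_cons hkn
    have htn : (k + 1).toNat = k.toNat + 1 := by omega
    rw [htn, hdrop, pvCntRec]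
    have hcp : ∀ s : Int × Int,
        (decide ((R[k.toNat]).2 = s.2 ∧ (R[k.toNat]).1 + s.1 = (R[k.toNat]).2)) = true
          ↔ (pvComp s == R[k.toNat]) = true := by
      intro s
      rcases s with ⟨s1, s2⟩
      rcases hr : R[k.toNat] with ⟨r1, r2⟩
      simp [pvComp]
      omega
    rw [List.countP_congr (fun s _ => hcp s)]
    ring

lemma pvBFold (L : List (Int × Int)) :
    ∀ (pre : List (Int × Int)) (c : Int),
    (L.foldl (fun (st : Int × PySem.Dict (Int × Int) Int) r =>
        (st.1 + st.2.getD (pvComp r) 0, st.2.insert r (st.2.getD r 0 + 1)))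
      (c, PySem.Dict.counter pre)).1 = c + pvBRec pre L := by
  induction L with
  | nil => intro pre c; simp [pvBRec]
  | cons r L ih =>
    intro pre c
    have h1 := PySem.Dict.foldl_insert_getD_add_one_eq_counter (pre ++ [r])
    rw [List.foldl_append, PySem.Dict.foldl_insert_getD_add_one_eq_counter] at h1
    simp only [List.foldl_cons, List.foldl_nil] at h1 ⊢
    rw [h1, ih (pre ++ [r]), PySem.Dict.getD_counter, pvBRec]
    ring

lemma pvModAbsLt (a b : Int) (h : b ≠ 0) : (PySem.Int.mod a b).natAbs < b.natAbs := by
  rcases lt_or_gt_of_ne h with hb | hb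
  · have h1 := PySem.Int.mod_neg_bounds a hb
    omega
  · have h1 := PySem.Int.mod_nonneg a hb
    have h2 := PySem.Int.mod_lt a hb
    omega

lemma pygcdB_eq_pygcdA (a b : Int) : pygcdB a b = pygcdA a b := by
  have main : ∀ (n : Nat) (a b : Int), b.natAbs ≤ n → pygcdBgo n a b = pygcdA a b := by
    intro n
    induction n with
    | zero =>
      intro a b hb
      have hb0 : b = 0 := by omega
      rw [pygcdA, pygcdBgo]
      simp [hb0]
    | succ n ih =>
      intro a b hb
      by_cases hb0 : b = 0
      · rw [pygcdA, pygcdBgo]; simp [hb0]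
      · rw [pygcdA, pygcdBgo]
        simp only [hb0, if_false, dite_false]
        exact ih b (PySem.Int.mod a b) (by have := pvModAbsLt a b hb0; omega)
  exact main b.natAbs a b le_rfl

-- ===== VERDICT (by name: the statement is the Claim_ definition above) =====
theorem solution_spec : Claim_equal_solution := by
  intro X Y _ _
  show solution X Y = solution_alt X Y
  rw [solution, solution_alt]
  set R := (X.zip Y).map (fun p : Int × Int =>
      let g := pygcdA p.1 p.2
      ((PySem.Int.floordiv p.1 g, PySem.Int.floordiv p.2 g) : Int × Int)) with hR
  -- A's side: the double index loop counts head-vs-rest down the list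
  rw [pvOuterA R R.length 0 le_rfl (by omega) 0]
  simp only [Int.toNat_zero, List.drop_zero, zero_add]
  -- B's side: the fold body is step-on-the-reduced-pair (gcdB = gcdA)
  have hbody : (fun (st : Int × PySem.Dict (Int × Int) Int) (p : Int × Int) =>
      let g := pygcdB p.1 p.2
      let x := PySem.Int.floordiv p.1 g
      let y := PySem.Int.floordiv p.2 g
      ((st.1 + st.2.getD (y - x, y) 0, st.2.insert (x, y) (st.2.getD (x, y) 0 + 1))
        : Int × PySem.Dict (Int × Int) Int))
    = (fun st p =>
      (fun (st : Int × PySem.Dict (Int × Int) Int) (r : Int × Int) =>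
        (st.1 + st.2.getD (pvComp r) 0, st.2.insert r (st.2.getD r 0 + 1))) st
        ((fun p : Int × Int =>
          let g := pygcdA p.1 p.2
          ((PySem.Int.floordiv p.1 g, PySem.Int.floordiv p.2 g) : Int × Int)) p)) := by
    funext st p
    simp only [pygcdB_eq_pygcdA, pvComp]
  have h0 : PySem.Dict.counter ([] : List (Int × Int)) = PySem.Dict.empty := rfl
  have hB := pvBFold R [] 0
  rw [h0] at hB
  conv at hB => lhs; rw [hR, List.foldl_map]
  rw [hbody, hB, zero_add, pvCntRec_eq_pvBRec]
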